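-- pv_equiv track=rewrite | github.com/benjie-git/CardStock | uiView.py | GetNextAvailableName
-- ===== SOURCE A (Python) =====
-- def GetNextAvailableName(base, existingNames):
--     i = 0
--     if base[-1] != "_":
--         base += "_"
--     while True:
--         i += 1
--         name = base+str(i)
--         if name not in existingNames:
--             return name
-- ===== SOURCE B (Python) =====
-- def GetNextAvailableName(base, existingNames):
--     b = base if base.endswith("_") else base + "_"
--     k = len(b)
--     used = set()
--     for name in existingNames:
--         if name.startswith(b):
--             s = name[k:]
--             if s != "" and not s.startswith("0") and all("0" <= c <= "9" for c in s):
--                 v = 0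
--                 for c in s:
--                     v = v * 10 + (ord(c) - 48)
--                 used.add(v)
--     i = 1
--     while i in used:
--         i += 1
--     return b + str(i)
-- ===== Notes on version B (the rewrite author's own statement) =====
-- stated objective: alternative
-- what changed: Instead of generating candidate names base_1, base_2, ... and scanning the whole list for each, B makes one pass over existingNames parsing each name's suffix into an integer (only canonical digit suffixes with no leading zero), builds the set of used indices, and returns base_i for the smallest positive i not in that set.
import Mathlib
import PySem

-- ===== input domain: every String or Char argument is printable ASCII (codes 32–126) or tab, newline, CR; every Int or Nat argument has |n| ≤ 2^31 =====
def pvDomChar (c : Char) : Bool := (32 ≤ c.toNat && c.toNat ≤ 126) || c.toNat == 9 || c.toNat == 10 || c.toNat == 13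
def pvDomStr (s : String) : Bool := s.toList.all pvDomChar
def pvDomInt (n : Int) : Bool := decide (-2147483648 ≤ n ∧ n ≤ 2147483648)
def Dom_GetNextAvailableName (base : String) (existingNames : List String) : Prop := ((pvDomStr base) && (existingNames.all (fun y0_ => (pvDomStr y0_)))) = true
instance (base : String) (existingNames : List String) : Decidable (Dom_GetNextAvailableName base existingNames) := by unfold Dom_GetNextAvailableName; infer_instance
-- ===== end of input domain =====

-- B replaces A's generate-and-scan loop (try base_1, base_2, … against the whole list each time) by one
-- pass that parses each existing name's canonical digit suffix into a set of used indices and then takes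
-- the smallest positive index not in the set (objective: alternative; same results).

-- ===== PORT A =====
-- A's 'while True' loop; fuel existingNames.length + 1 is a totality guard only (proved sufficient below:
-- among the first length+1 candidate names one is always free, so the fuel-0 branch is unreachable).
def pvAloop (b : String) (names : List String) : Nat → Nat → String
  | 0, i => b ++ PySem.Int.toStr ((i + 1 : Nat) : Int)
  | f+1, i =>
    let name := b ++ PySem.Int.toStr ((i + 1 : Nat) : Int)
    if name ∈ names then pvAloop b names f (i + 1) else name

def GetNextAvailableName (base : String) (existingNames : List String) : String :=
  let b := if PySem.Str.pyGet? base (-1) ≠ some '_' then base ++ "_" else base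
  pvAloop b existingNames (existingNames.length + 1) 0

-- ===== PORT B =====
-- the body of B's for-loop: canonical digit suffix of `name` after prefix `b`, as a number
def pvParse? (b : String) (name : String) : Option Nat :=
  if PySem.Str.startswith name b then
    let s := PySem.Str.slice name (some (PySem.Str.len b)) none
    if s ≠ "" ∧ PySem.Str.startswith s "0" = false ∧
        s.toList.all (fun c => decide ('0' ≤ c) && decide (c ≤ '9')) = true then
      some (s.toList.foldl (fun v c => v * 10 + (c.toNat - 48)) 0)
    else none
  else none

def pvUsed (b : String) (names : List String) : PySem.Set Nat :=
  names.foldl (fun acc name =>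
    match pvParse? b name with
    | some v => PySem.Set.add acc v
    | none => acc) PySem.Set.empty

-- B's 'while i in used: i += 1'; fuel used.length + 1 is a totality guard only (proved sufficient below)
def pvBloop (used : PySem.Set Nat) : Nat → Nat → Nat
  | 0, i => i
  | f+1, i => if i ∈ used then pvBloop used f (i + 1) else i

def GetNextAvailableName_alt (base : String) (existingNames : List String) : String :=
  let b := if PySem.Str.endswith base "_" then base else base ++ "_"
  let used := pvUsed b existingNames
  b ++ PySem.Int.toStr ((pvBloop used (used.length + 1) 1 : Nat) : Int)

-- ===== PRECONDITION & SPEC =====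
-- Pre_ excludes only base = "", on which Python A raises IndexError at base[-1].
def Pre_GetNextAvailableName (base : String) (existingNames : List String) : Prop := base ≠ ""
instance (base : String) (existingNames : List String) : Decidable (Pre_GetNextAvailableName base existingNames) := by unfold Pre_GetNextAvailableName; infer_instance
def pvWitness_GetNextAvailableName : String × List String := ("shape", ["shape_1", "shape_2"])

def Spec_GetNextAvailableName (base : String) (existingNames : List String) (out : String) : Prop := out = GetNextAvailableName_alt base existingNames
instance (base : String) (existingNames : List String) (out : String) : Decidable (Spec_GetNextAvailableName base existingNames out) := by unfold Spec_GetNextAvailableName; infer_instance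

-- ===== CLAIM (what is proved, stated in full; the proofs are below) =====
def Claim_equal_GetNextAvailableName : Prop := ∀ (base : String) (existingNames : List String), Dom_GetNextAvailableName base existingNames → Pre_GetNextAvailableName base existingNames → Spec_GetNextAvailableName base existingNames (GetNextAvailableName base existingNames)

-- ===== LEMMAS AND PROOFS =====

-- the decimal value of a digit string (B's inner ord-fold, on List Char)
def pvVal (cs : List Char) : Nat := cs.foldl (fun v c => v * 10 + (c.toNat - 48)) 0

-- most-significant-first decimal digits of n (what str(n) produces for n ≥ 0)
def pvDec (n : Nat) : List Char :=
  if h : n < 10 then [Nat.digitChar n] else pvDec (n / 10) ++ [Nat.digitChar (n % 10)]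
decreasing_by exact Nat.div_lt_self (by omega) (by omega)

-- canonical digit strings: nonempty, all ASCII digits, no leading zero
def pvCanon (cs : List Char) : Prop :=
  cs ≠ [] ∧ (∀ c ∈ cs, '0' ≤ c ∧ c ≤ '9') ∧ cs.head? ≠ some '0'

lemma pv_char_le_iff (c d : Char) : c ≤ d ↔ c.toNat ≤ d.toNat := by
  rw [Char.le_def, UInt32.le_iff_toNat_le]; exact Iff.rfl

lemma pv_char_eq_of_toNat {a b : Char} (h : a.toNat = b.toNat) : a = b :=
  Char.ext (UInt32.toNat_inj.mp h)

lemma pv_digitChar (d : Nat) (h : d < 10) :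
    (Nat.digitChar d).toNat = d + 48 ∧ '0' ≤ Nat.digitChar d ∧ Nat.digitChar d ≤ '9' ∧
      (1 ≤ d → Nat.digitChar d ≠ '0') := by
  interval_cases d <;>
    exact ⟨by decide, by decide, by decide, fun h1 => by first | decide | exact absurd h1 (by decide)⟩

lemma pv_char_digit (c : Char) (h1 : '0' ≤ c) (h2 : c ≤ '9') :
    c.toNat - 48 < 10 ∧ Nat.digitChar (c.toNat - 48) = c ∧ (c ≠ '0' → 1 ≤ c.toNat - 48) := by
  have hz0 : ('0' : Char).toNat = 48 := by decide
  have hb : 48 ≤ c.toNat ∧ c.toNat ≤ 57 := ⟨(pv_char_le_iff '0' c).mp h1, (pv_char_le_iff c '9').mp h2⟩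
  have hd : c.toNat - 48 < 10 := by omega
  obtain ⟨h48, -, -, -⟩ := pv_digitChar (c.toNat - 48) hd
  have heq : Nat.digitChar (c.toNat - 48) = c := pv_char_eq_of_toNat (by omega)
  refine ⟨hd, heq, fun hne => ?_⟩
  by_contra hlt
  exact hne (pv_char_eq_of_toNat (by omega))

lemma pv_toDigitsCore (f : Nat) : ∀ n acc, n < f →
    Nat.toDigitsCore 10 f n acc = pvDec n ++ acc := by
  induction f with
  | zero => intro n acc h; omega
  | succ f ih =>
    intro n acc h
    rw [Nat.toDigitsCore]
    by_cases h10 : n / 10 = 0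
    · have hn : n < 10 := by omega
      rw [if_pos h10, pvDec, dif_pos hn, Nat.mod_eq_of_lt hn]
      simp
    · have hn : ¬ n < 10 := by omega
      rw [if_neg h10, ih (n / 10) _ (by omega)]
      conv_rhs => rw [pvDec]
      rw [dif_neg hn]
      simp

lemma pv_toChars (n : Nat) : PySem.Int.toChars (n : Int) = pvDec n := by
  have h0 : ¬ ((n : Int) < 0) := by omega
  simp only [PySem.Int.toChars, if_neg h0, Int.toNat_natCast, Nat.toDigits]
  rw [pv_toDigitsCore (n + 1) n [] (by omega)]
  simp

lemma pv_val_mono (cs : List Char) : ∀ a, a ≤ cs.foldl (fun v c => v * 10 + (c.toNat - 48)) a := by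
  induction cs with
  | nil => intro a; simp
  | cons c cs ih =>
    intro a
    simp only [List.foldl_cons]
    calc a ≤ a * 10 + (c.toNat - 48) := by omega
      _ ≤ _ := ih _

lemma pv_val_append (cs : List Char) (c : Char) :
    pvVal (cs ++ [c]) = pvVal cs * 10 + (c.toNat - 48) := by
  simp [pvVal, List.foldl_append]

lemma pv_dec_spec (n : Nat) :
    pvVal (pvDec n) = n ∧ pvDec n ≠ [] ∧ (∀ c ∈ pvDec n, '0' ≤ c ∧ c ≤ '9') ∧
      (1 ≤ n → (pvDec n).head? ≠ some '0') := by
  induction n using Nat.strong_induction_on with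
  | _ n ih =>
    by_cases h : n < 10
    · obtain ⟨h48, hge, hle, hnz⟩ := pv_digitChar n h
      rw [pvDec, dif_pos h]
      refine ⟨by simp [pvVal]; omega, by simp, ?_, fun h1 => by simp [hnz h1]⟩
      intro c hc; simp at hc; subst hc; exact ⟨hge, hle⟩
    · have hdiv : n / 10 < n := Nat.div_lt_self (by omega) (by omega)
      obtain ⟨hval, hne, hdig, hhd⟩ := ih (n / 10) hdiv
      obtain ⟨h48, hge, hle, -⟩ := pv_digitChar (n % 10) (by omega)
      rw [pvDec, dif_neg h]
      refine ⟨?_, by simp, ?_, ?_⟩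
      · rw [pv_val_append, hval]; omega
      · intro c hc
        rcases List.mem_append.mp hc with hc | hc
        · exact hdig c hc
        · simp at hc; subst hc; exact ⟨hge, hle⟩
      · intro _
        obtain ⟨c0, rest, hcons⟩ := List.exists_cons_of_ne_nil hne
        rw [hcons]
        simpa [hcons] using hhd (by omega)

lemma pv_canon_val_pos (cs : List Char) (h : pvCanon cs) : 1 ≤ pvVal cs := by
  unfold pvCanon at h
  obtain ⟨hne, hdig, hhd⟩ := h
  obtain ⟨c0, rest, rfl⟩ := List.exists_cons_of_ne_nil hne
  have hc0 : c0 ≠ '0' := by intro hc; exact hhd (by simp [hc])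
  obtain ⟨h0, h9⟩ := hdig c0 (by simp)
  obtain ⟨-, -, hpos⟩ := pv_char_digit c0 h0 h9
  have h1 := hpos hc0
  have := pv_val_mono rest (0 * 10 + (c0.toNat - 48))
  simp only [pvVal, List.foldl_cons]
  omega

lemma pv_canon_dec (cs : List Char) (h : pvCanon cs) : pvDec (pvVal cs) = cs := by
  induction cs using List.reverseRecOn with
  | nil => exact absurd rfl h.1
  | append_singleton s' c ih =>
    have hcanonh := h
    unfold pvCanon at h
    obtain ⟨-, hdig, hhd⟩ := h
    obtain ⟨hc0, hc9⟩ := hdig c (by simp)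
    obtain ⟨hdlt, hdchar, hdpos⟩ := pv_char_digit c hc0 hc9
    rcases eq_or_ne s' [] with hs | hs
    · subst hs
      have hcne : c ≠ '0' := by intro hc; exact hhd (by simp [hc])
      simp only [List.nil_append] at *
      have hv : pvVal [c] = c.toNat - 48 := by simp [pvVal]
      rw [hv, pvDec, dif_pos hdlt, hdchar]
    · obtain ⟨c0, rest, hcons⟩ := List.exists_cons_of_ne_nil hs
      have hcanon' : pvCanon s' := by
        unfold pvCanon
        refine ⟨hs, fun x hx => hdig x (by simp [hx]), ?_⟩
        rw [hcons] at hhd ⊢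
        simpa using hhd
      have hih := ih hcanon'
      have hpos := pv_canon_val_pos s' hcanon'
      rw [pv_val_append]
      have hge : ¬ pvVal s' * 10 + (c.toNat - 48) < 10 := by omega
      rw [pvDec, dif_neg hge]
      have hq : (pvVal s' * 10 + (c.toNat - 48)) / 10 = pvVal s' := by omega
      have hr : (pvVal s' * 10 + (c.toNat - 48)) % 10 = c.toNat - 48 := by omega
      rw [hq, hr, hih, hdchar]

lemma pv_parse_iff (b name : String) (v : Nat) :
    pvParse? b name = some v ↔ 1 ≤ v ∧ name.toList = b.toList ++ pvDec v := by
  have hslice : (PySem.Str.slice name (some (PySem.Str.len b)) none).toList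
      = name.toList.drop b.toList.length := by
    rw [PySem.Str.toList_slice, PySem.Str.len_eq, PySem.Chars.slice_eq_listSlice,
      PySem.List.slice_from_natCast]
  have hpre_single : ∀ (l : List Char), (['0'] <+: l) ↔ l.head? = some '0' := by
    intro l
    constructor
    · rintro ⟨t, rfl⟩; simp
    · intro hl
      cases l with
      | nil => simp at hl
      | cons c0 rest =>
        simp at hl
        exact ⟨rest, by simp [hl]⟩
  constructor
  · intro h
    simp only [pvParse?] at h
    split at h
    next hst =>
      split at h
      next hcond =>
        obtain ⟨hsne, hz, hall⟩ := hcond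
        injection h with hv
        have hprefix : b.toList <+: name.toList := by
          rw [PySem.Str.startswith_eq] at hst
          exact (PySem.Chars.startswith_iff _ _).mp hst
        obtain ⟨t, ht⟩ := hprefix
        have hdrop : (PySem.Str.slice name (some (PySem.Str.len b)) none).toList = t := by
          rw [hslice, ← ht, List.drop_left]
        have htne : t ≠ [] := by
          intro h0
          exact hsne (String.toList_injective (by rw [hdrop, h0]; simp))
        have hdig : ∀ x ∈ t, '0' ≤ x ∧ x ≤ '9' := by
          intro x hx
          have := List.all_eq_true.mp hall x (by rw [hdrop]; exact hx)
          simp at this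
          exact this
        have hhd : t.head? ≠ some '0' := by
          intro hh
          have hzt : PySem.Str.startswith (PySem.Str.slice name (some (PySem.Str.len b)) none) "0" = true := by
            rw [PySem.Str.startswith_eq]
            refine (PySem.Chars.startswith_iff _ _).mpr ?_
            have h0l : ("0" : String).toList = ['0'] := by decide
            rw [h0l, hdrop]
            exact (hpre_single t).mpr hh
          rw [hz] at hzt; exact Bool.false_ne_true hzt
        have hcanon : pvCanon t := by unfold pvCanon; exact ⟨htne, hdig, hhd⟩
        have hpos := pv_canon_val_pos t hcanon
        have hcd := pv_canon_dec t hcanon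
        simp only [pvVal] at hpos hcd
        constructor
        · rw [← hv, hdrop]; exact hpos
        · rw [← ht, ← hv, hdrop, hcd]
      next => exact absurd h (by simp)
    next => exact absurd h (by simp)
  · rintro ⟨hv, hname⟩
    obtain ⟨hval, hdne, hdig, hhd⟩ := pv_dec_spec v
    have hst : PySem.Str.startswith name b = true := by
      rw [PySem.Str.startswith_eq]
      exact (PySem.Chars.startswith_iff _ _).mpr ⟨pvDec v, hname.symm⟩
    have hdrop : (PySem.Str.slice name (some (PySem.Str.len b)) none).toList = pvDec v := by
      rw [hslice, hname, List.drop_left]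
    have hc : (PySem.Str.slice name (some (PySem.Str.len b)) none ≠ "" ∧
        PySem.Str.startswith (PySem.Str.slice name (some (PySem.Str.len b)) none) "0" = false ∧
        (PySem.Str.slice name (some (PySem.Str.len b)) none).toList.all
          (fun c => decide ('0' ≤ c) && decide (c ≤ '9')) = true) := by
      refine ⟨?_, ?_, ?_⟩
      · intro h0; rw [h0] at hdrop; exact hdne (by simpa using hdrop.symm)
      · rw [PySem.Str.startswith_eq, Bool.eq_false_iff]
        intro hstz
        have hpz := (PySem.Chars.startswith_iff _ _).mp hstz
        have h0l : ("0" : String).toList = ['0'] := by decide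
        rw [h0l, hdrop] at hpz
        exact hhd hv ((hpre_single _).mp hpz)
      · refine List.all_eq_true.mpr fun x hx => ?_
        rw [hdrop] at hx
        obtain ⟨hx1, hx2⟩ := hdig x hx
        simp [hx1, hx2]
    simp only [pvParse?]
    rw [if_pos hst, if_pos hc, hdrop]
    simp only [pvVal] at hval
    rw [hval]

lemma pv_mem_used (b : String) (names : List String) (i : Nat) :
    i ∈ pvUsed b names ↔ ∃ name ∈ names, pvParse? b name = some i := by
  suffices hgen : ∀ (ns : List String) (acc : PySem.Set Nat),
      i ∈ ns.foldl (fun acc name =>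
        match pvParse? b name with
        | some v => PySem.Set.add acc v
        | none => acc) acc ↔ i ∈ acc ∨ ∃ name ∈ ns, pvParse? b name = some i by
    have := hgen names PySem.Set.empty
    simpa [pvUsed, PySem.Set.empty] using this
  intro ns
  induction ns with
  | nil => intro acc; simp
  | cons nm rest ih =>
    intro acc
    simp only [List.foldl_cons]
    rw [ih]
    cases hp : pvParse? b nm with
    | none =>
      simp [hp]
      try tauto
    | some v =>
      simp [hp, PySem.Set.mem_add]
      constructor
      · rintro ((h | rfl) | h)
        · exact Or.inl h
        · exact Or.inr (Or.inl rfl)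
        · exact Or.inr (Or.inr h)
      · rintro (h | h | h)
        · exact Or.inl (Or.inl h)
        · exact Or.inl (Or.inr h.symm)
        · exact Or.inr h

lemma pv_used_nodup (b : String) (names : List String) : (pvUsed b names).Nodup := by
  suffices hgen : ∀ (ns : List String) (acc : PySem.Set Nat), acc.Nodup →
      (ns.foldl (fun acc name =>
        match pvParse? b name with
        | some v => PySem.Set.add acc v
        | none => acc) acc).Nodup by
    exact hgen names PySem.Set.empty List.nodup_nil
  intro ns
  induction ns with
  | nil => intro acc h; simpa using h
  | cons nm rest ih =>
    intro acc h
    simp only [List.foldl_cons]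
    apply ih
    cases hp : pvParse? b nm with
    | none => simpa [hp] using h
    | some v => simpa [hp] using PySem.Set.nodup_add acc v h

lemma pv_used_len (b : String) (names : List String) :
    (pvUsed b names).length ≤ names.length := by
  suffices hgen : ∀ (ns : List String) (acc : PySem.Set Nat),
      (ns.foldl (fun acc name =>
        match pvParse? b name with
        | some v => PySem.Set.add acc v
        | none => acc) acc).length ≤ acc.length + ns.length by
    simpa [pvUsed, PySem.Set.empty] using hgen names PySem.Set.empty
  intro ns
  induction ns with
  | nil => intro acc; simp
  | cons nm rest ih =>
    intro acc
    simp only [List.foldl_cons, List.length_cons]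
    have hstep : (match pvParse? b nm with
        | some v => PySem.Set.add acc v
        | none => acc).length ≤ acc.length + 1 := by
      cases hp : pvParse? b nm with
      | none => simp
      | some v =>
        simp only [PySem.Set.add]
        split <;> simp
    calc _ ≤ _ := ih _
      _ ≤ acc.length + 1 + rest.length := by omega
      _ = acc.length + (rest.length + 1) := by omega

lemma pv_PQ (b : String) (names : List String) (i : Nat) (h : 1 ≤ i) :
    (b ++ PySem.Int.toStr (i : Int)) ∈ names ↔ i ∈ pvUsed b names := by
  have htl : (b ++ PySem.Int.toStr (i : Int)).toList = b.toList ++ pvDec i := by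
    simp [PySem.Int.toList_toStr, pv_toChars]
  rw [pv_mem_used]
  constructor
  · intro hmem
    exact ⟨b ++ PySem.Int.toStr (i : Int), hmem, (pv_parse_iff _ _ _).mpr ⟨h, htl⟩⟩
  · rintro ⟨name, hmem, hp⟩
    obtain ⟨-, hname⟩ := (pv_parse_iff _ _ _).mp hp
    have heq : name = b ++ PySem.Int.toStr (i : Int) := String.toList_injective (by rw [hname, htl])
    rwa [← heq]

lemma pv_first_missing (used : List Nat) (h : used.Nodup) :
    ∃ k ≤ used.length, (1 + k) ∉ used := by
  by_contra hcon
  push_neg at hcon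
  have hsub : (Finset.range (used.length + 1)).image (fun k => 1 + k) ⊆ used.toFinset := by
    intro x hx
    obtain ⟨k, hk, rfl⟩ := Finset.mem_image.mp hx
    have hk' : k < used.length + 1 := Finset.mem_range.mp hk
    exact List.mem_toFinset.mpr (hcon k (by omega))
  have hcard : ((Finset.range (used.length + 1)).image (fun k => 1 + k)).card = used.length + 1 := by
    rw [Finset.card_image_of_injective _ (fun a b hab => by omega)]
    simp
  have hle := Finset.card_le_card hsub
  rw [hcard, List.toFinset_card_of_nodup h] at hle
  omega

lemma pv_aloop_eq (b : String) (names : List String) :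
    ∀ (f i : Nat) (hex : ∃ k, (b ++ PySem.Int.toStr ((i + 1 + k : Nat) : Int)) ∉ names),
      Nat.find hex < f →
      pvAloop b names f i = b ++ PySem.Int.toStr ((i + 1 + Nat.find hex : Nat) : Int) := by
  intro f
  induction f with
  | zero => intro i hex hf; omega
  | succ f ih =>
    intro i hex hf
    by_cases hmem : (b ++ PySem.Int.toStr ((i + 1 : Nat) : Int)) ∈ names
    · have hne0 : Nat.find hex ≠ 0 := by
        intro h0
        have hsp := Nat.find_spec hex
        rw [h0] at hsp
        exact hsp (by simpa using hmem)
      have hex' : ∃ k, (b ++ PySem.Int.toStr ((i + 1 + 1 + k : Nat) : Int)) ∉ names := by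
        refine ⟨Nat.find hex - 1, ?_⟩
        rw [show i + 1 + 1 + (Nat.find hex - 1) = i + 1 + Nat.find hex by omega]
        exact Nat.find_spec hex
      have hfind : Nat.find hex = Nat.find hex' + 1 := by
        rw [Nat.find_eq_iff]
        constructor
        · rw [show i + 1 + (Nat.find hex' + 1) = i + 1 + 1 + Nat.find hex' by omega]
          exact Nat.find_spec hex'
        · intro m hm
          match m with
          | 0 => simpa using hmem
          | m + 1 =>
            have hmin := Nat.find_min hex' (show m < Nat.find hex' by omega)
            rw [show i + 1 + (m + 1) = i + 1 + 1 + m by omega]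
            simpa using hmin
      rw [pvAloop, if_pos hmem, ih (i + 1) hex' (by omega), hfind]
      congr 2
      omega
    · have hfind0 : Nat.find hex = 0 := by
        rw [Nat.find_eq_zero]
        simpa using hmem
      rw [pvAloop, if_neg hmem, hfind0]

lemma pv_bloop_eq (used : PySem.Set Nat) :
    ∀ (f i : Nat) (hex : ∃ k, (i + k) ∉ used), Nat.find hex < f →
      pvBloop used f i = i + Nat.find hex := by
  intro f
  induction f with
  | zero => intro i hex hf; omega
  | succ f ih =>
    intro i hex hf
    by_cases hmem : i ∈ used
    · have hne0 : Nat.find hex ≠ 0 := by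
        intro h0
        have hsp := Nat.find_spec hex
        rw [h0] at hsp
        exact hsp (by simpa using hmem)
      have hex' : ∃ k, (i + 1 + k) ∉ used := by
        refine ⟨Nat.find hex - 1, ?_⟩
        rw [show i + 1 + (Nat.find hex - 1) = i + Nat.find hex by omega]
        exact Nat.find_spec hex
      have hfind : Nat.find hex = Nat.find hex' + 1 := by
        rw [Nat.find_eq_iff]
        constructor
        · rw [show i + (Nat.find hex' + 1) = i + 1 + Nat.find hex' by omega]
          exact Nat.find_spec hex'
        · intro m hm
          match m with
          | 0 => simpa using hmem
          | m + 1 =>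
            have hmin := Nat.find_min hex' (show m < Nat.find hex' by omega)
            rw [show i + (m + 1) = i + 1 + m by omega]
            simpa using hmin
      rw [pvBloop, if_pos hmem, ih (i + 1) hex' (by omega), hfind]
      omega
    · have hfind0 : Nat.find hex = 0 := by
        rw [Nat.find_eq_zero]
        simpa using hmem
      rw [pvBloop, if_neg hmem, hfind0]
      omega

lemma pv_b_eq (base : String) :
    (if PySem.Str.pyGet? base (-1) ≠ some '_' then base ++ "_" else base) =
      (if PySem.Str.endswith base "_" then base else base ++ "_") := by
  have hlast : PySem.Str.pyGet? base (-1) = base.toList.getLast? := by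
    rw [PySem.Str.pyGet?_eq, PySem.Chars.pyGet?_eq_listPyGet?, PySem.List.pyGet?_neg_one]
  have hends : PySem.Str.endswith base "_" = true ↔ base.toList.getLast? = some '_' := by
    rw [PySem.Str.endswith_eq, PySem.Chars.endswith_iff]
    have h1 : ("_" : String).toList = ['_'] := by decide
    rw [h1]
    constructor
    · rintro ⟨t, ht⟩
      rw [← ht]
      simp
    · intro hl
      obtain ⟨ys, hys⟩ := List.getLast?_eq_some_iff.mp hl
      exact ⟨ys, hys.symm⟩
  by_cases hE : PySem.Str.endswith base "_" = true
  · rw [if_pos hE, if_neg (by rw [hlast]; simpa using hends.mp hE)]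
  · rw [if_neg hE, if_pos ?_]
    rw [hlast]
    intro hsome
    exact hE (hends.mpr hsome)

-- ===== VERDICT (by name: the statement is the Claim_ definition above) =====
theorem GetNextAvailableName_spec : Claim_equal_GetNextAvailableName := by
  intro base names hdom hpre
  unfold Spec_GetNextAvailableName GetNextAvailableName GetNextAvailableName_alt
  dsimp only
  rw [pv_b_eq base]
  set b := (if PySem.Str.endswith base "_" then base else base ++ "_") with hb
  obtain ⟨k0, hk0le, hk0⟩ := pv_first_missing (pvUsed b names) (pv_used_nodup b names)
  have hexB : ∃ k, (1 + k) ∉ pvUsed b names := ⟨k0, hk0⟩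
  have hfB' : Nat.find hexB ≤ (pvUsed b names).length := le_trans (Nat.find_min' hexB hk0) hk0le
  have hfB : Nat.find hexB < (pvUsed b names).length + 1 := by omega
  have hiffPQ : ∀ n : Nat, ((b ++ PySem.Int.toStr ((0 + 1 + n : Nat) : Int)) ∉ names) ↔ ((1 + n) ∉ pvUsed b names) := by
    intro n
    rw [show 0 + 1 + n = 1 + n by omega]
    exact not_congr (pv_PQ b names (1 + n) (by omega))
  have hexA : ∃ k, (b ++ PySem.Int.toStr ((0 + 1 + k : Nat) : Int)) ∉ names :=
    ⟨k0, (hiffPQ k0).mpr hk0⟩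
  have hAB : Nat.find hexA = Nat.find hexB := Nat.find_congr' (fun {n} => hiffPQ n)
  have hlen : (pvUsed b names).length ≤ names.length := pv_used_len b names
  have hfA : Nat.find hexA < names.length + 1 := by omega
  rw [pv_aloop_eq b names (names.length + 1) 0 hexA hfA,
    pv_bloop_eq (pvUsed b names) ((pvUsed b names).length + 1) 1 hexB hfB]
  congr 2
  omega
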